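-- pv_equiv track=rewrite | github.com/MaciejGrudziaz/turing-machine-python | src/config/tokenizer.py | __check_if_const_value__
-- ===== SOURCE A (Python) =====
-- class TokenizerError(Exception):
--     def __init__(self, message):
--         self.message = message
--         super().__init__(self.message)
--
-- def __check_if_const_value__(value: str) -> bool:
--     if len(value) < 2:
--         return False
--     if value[0] != "\"" or value[-1] != "\"":
--         return False
--
--     prev_char = None
--     for c in value[1:-1]:
--         if c == "\"":
--             if prev_char is None or prev_char != "\\":
--                 raise TokenizerError(f"Found unescaped character '\"' inside constant value definition.")
--         prev_char = c
--     return True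
-- ===== SOURCE B (Python) =====
-- class TokenizerError(Exception):
--     def __init__(self, message):
--         self.message = message
--         super().__init__(self.message)
--
-- def __check_if_const_value__(value: str) -> bool:
--     if len(value) < 2:
--         return False
--     if value[0] != "\"" or value[-1] != "\"":
--         return False
--     if "\"" in value[1:-1].replace("\\\"", ""):
--         raise TokenizerError(f"Found unescaped character '\"' inside constant value definition.")
--     return True
-- ===== Notes on version B (the rewrite author's own statement) =====
-- stated objective: idiomatic
-- what changed: The stateful prev_char scan is replaced by a staged strategy: first delete every escaped quote (each backslash-quote pair) from the interior with str.replace, then a plain substring membership test decides whether an unescaped quote remains (raising the same TokenizerError).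
import Mathlib
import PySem

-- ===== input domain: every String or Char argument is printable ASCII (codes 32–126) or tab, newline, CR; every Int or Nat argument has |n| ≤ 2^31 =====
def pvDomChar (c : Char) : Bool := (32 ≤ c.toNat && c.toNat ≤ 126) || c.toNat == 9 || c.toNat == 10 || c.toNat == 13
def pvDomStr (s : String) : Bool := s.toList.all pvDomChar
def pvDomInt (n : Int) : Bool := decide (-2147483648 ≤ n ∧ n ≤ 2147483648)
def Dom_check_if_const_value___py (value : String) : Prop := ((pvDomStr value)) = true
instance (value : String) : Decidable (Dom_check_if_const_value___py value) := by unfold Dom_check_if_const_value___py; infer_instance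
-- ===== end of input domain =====

-- B replaces the stateful prev_char loop with a staged strategy: delete every escaped
-- quote (each backslash-quote pair) via str.replace, then a substring membership test
-- (idiomatic; same behaviour, TokenizerError raise included, which Pre_ excludes).


-- ===== PORT A =====
-- A's for-loop over value[1:-1] with the prev_char accumulator; the raise branch
-- yields false here (those inputs are excluded by Pre_ below).
def pvALoop (prev : Option Char) : List Char → Bool
  | [] => true
  | c :: rest =>
      if c = '"' then
        if prev = none ∨ prev ≠ some '\\' then false  -- raise TokenizerError (outside Pre_)
        else pvALoop (some c) rest
      else pvALoop (some c) rest

def check_if_const_value___py (value : String) : Bool :=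
  if PySem.Str.len value < 2 then false
  else if PySem.Str.pyGet? value 0 ≠ some '"' ∨ PySem.Str.pyGet? value (-1) ≠ some '"' then false
  else pvALoop none (PySem.Str.slice value (some 1) (some (-1))).toList

-- ===== PORT B =====
-- B: the same two guards, then delete every escaped quote from the interior with
-- replace('\\"','') and test whether a '"' remains; the raise branch yields false
-- here (those inputs are excluded by Pre_ below).
def check_if_const_value___py_alt (value : String) : Bool :=
  if PySem.Str.len value < 2 then false
  else if PySem.Str.pyGet? value 0 ≠ some '"' ∨ PySem.Str.pyGet? value (-1) ≠ some '"' then false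
  else if PySem.Str.isIn "\"" (PySem.Str.replace (PySem.Str.slice value (some 1) (some (-1))) "\\\"" "")
  then false  -- raise TokenizerError (outside Pre_)
  else true

-- ===== PRECONDITION & SPEC =====
-- Pre_ excludes exactly the inputs on which A raises TokenizerError: quote-delimited strings
-- of length at least 2 whose interior contains a quote not immediately preceded by a backslash.
def Pre_check_if_const_value___py (value : String) : Prop :=
  ¬ (2 ≤ value.toList.length ∧
     value.toList[0]? = some '"' ∧
     value.toList[value.toList.length - 1]? = some '"' ∧
     ∃ i, i < value.toList.length - 1 ∧ 1 ≤ i ∧ value.toList[i]! = '"' ∧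
          (i = 1 ∨ value.toList[i-1]! ≠ '\\'))
instance (value : String) : Decidable (Pre_check_if_const_value___py value) := by
  unfold Pre_check_if_const_value___py; infer_instance

def pvWitness_check_if_const_value___py : String := "\"ab\\\"c\""

def Spec_check_if_const_value___py (value : String) (out : Bool) : Prop := out = check_if_const_value___py_alt value
instance (value : String) (out : Bool) : Decidable (Spec_check_if_const_value___py value out) := by unfold Spec_check_if_const_value___py; infer_instance

-- ===== CLAIM (what is proved, stated in full; the proofs are below) =====
def Claim_equal_check_if_const_value___py : Prop := ∀ (value : String), Dom_check_if_const_value___py value → Pre_check_if_const_value___py value → Spec_check_if_const_value___py value (check_if_const_value___py value)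

-- ===== LEMMAS AND PROOFS =====

-- Proof-side characterisation of B's replace call: delete each backslash-quote pair, left to right.
def rmEsc : List Char → List Char
  | '\\' :: '"' :: t => rmEsc t
  | c :: t => c :: rmEsc t
  | [] => []

theorem rmEsc_not_pair (c : Char) (t : List Char)
    (h : ¬ (c = '\\' ∧ ∃ t', t = '"' :: t')) :
    rmEsc (c :: t) = c :: rmEsc t := by
  rw [rmEsc.eq_def]
  split
  · rename_i t' heq
    injection heq with h1 h2
    exact absurd ⟨h1, t', h2⟩ h
  · rename_i hno heq
    injection heq with e1 e2; subst e1; subst e2; rfl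
  · rename_i heq; cases heq

theorem isPrefixOf_pair_iff (c : Char) (t : List Char) :
    List.isPrefixOf ['\\', '"'] (c :: t) = true ↔ (c = '\\' ∧ ∃ t', t = '"' :: t') := by
  cases t with
  | nil => simp [List.isPrefixOf]
  | cons c' t' =>
      simp [List.isPrefixOf]
      tauto

theorem replace_go_eq (fuel : Nat) : ∀ (l acc : List Char), l.length ≤ fuel →
    PySem.Chars.replace.go ['\\', '"'] [] fuel l acc = acc.reverse ++ rmEsc l := by
  induction fuel with
  | zero =>
      intro l acc h
      have hl : l = [] := by cases l <;> simp_all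
      subst hl
      rw [PySem.Chars.replace.go.eq_def]
      simp [rmEsc]
  | succ fuel ih =>
      intro l acc h
      match l with
      | [] => rw [PySem.Chars.replace.go.eq_def]; simp [rmEsc]
      | c :: t =>
          rw [PySem.Chars.replace.go.eq_def]
          dsimp only
          by_cases hp : List.isPrefixOf ['\\', '"'] (c :: t) = true
          · rw [if_pos hp]
            obtain ⟨hc, t', ht'⟩ := (isPrefixOf_pair_iff c t).mp hp
            subst hc; subst ht'
            have hd : List.drop (['\\', '"'].length) ('\\' :: '"' :: t') = t' := by simp
            rw [hd]
            simp only [List.reverse_nil, List.nil_append]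
            rw [ih t' acc (by simp at h; omega)]
            simp [rmEsc]
          · rw [if_neg hp]
            rw [ih t (c :: acc) (by simp at h; omega)]
            rw [rmEsc_not_pair c t (fun hh => hp ((isPrefixOf_pair_iff c t).mpr hh))]
            simp

theorem replace_eq_rmEsc (l : List Char) :
    PySem.Chars.replace l ['\\', '"'] [] = rmEsc l := by
  rw [PySem.Chars.replace]
  simp only [List.isEmpty]
  exact replace_go_eq l.length l [] (le_refl _)

-- pvALoop only looks at prev through 'prev = some '\\'', and only when the head is '"'.
theorem pvALoop_prev_irrel (cs : List Char) (prev : Option Char)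
    (h : prev ≠ some '\\' ∨ ∀ t, cs ≠ '"' :: t) :
    pvALoop prev cs = pvALoop none cs := by
  match cs with
  | [] => rfl
  | c :: t =>
      by_cases hc : c = '"'
      · subst hc
        rcases h with h | h
        · simp [pvALoop, h]
        · exact absurd rfl (h t)
      · simp only [pvALoop, if_neg hc]

-- A's loop answers true exactly when no unescaped quote survives the pair-deletion.
theorem pvALoop_eq_rmEsc (cs : List Char) :
    pvALoop none cs = ! decide ('"' ∈ rmEsc cs) := by
  induction cs using rmEsc.induct with
  | case1 t ih =>
      have h1 : pvALoop none ('\\' :: '"' :: t) = pvALoop (some '"') t := by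
        simp [pvALoop]
      rw [h1, pvALoop_prev_irrel t (some '"') (Or.inl (by simp)), ih]
      rw [rmEsc]
  | case2 c t hno ih =>
      have hpair : ¬ (c = '\\' ∧ ∃ t', t = '"' :: t') := by
        rintro ⟨hc, t', ht'⟩; exact hno t' hc ht'
      rw [rmEsc_not_pair c t hpair]
      by_cases hc : c = '"'
      · subst hc; simp [pvALoop]
      · have h1 : pvALoop none (c :: t) = pvALoop (some c) t := by simp [pvALoop, hc]
        have h2 : pvALoop (some c) t = pvALoop none t := by
          by_cases hb : c = '\\'
          · subst hb
            refine pvALoop_prev_irrel t (some '\\') (Or.inr ?_)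
            intro t' ht'
            exact hno t' rfl ht'
          · exact pvALoop_prev_irrel t (some c) (Or.inl (by simp [hb]))
        rw [h1, h2, ih]
        simp
        exact fun _ e => hc e.symm
  | case3 => simp [pvALoop, rmEsc]

-- The two ports agree on every input (the excluded raise region maps to false in both).
theorem ports_eq (value : String) :
    check_if_const_value___py value = check_if_const_value___py_alt value := by
  unfold check_if_const_value___py check_if_const_value___py_alt
  split
  · rfl
  split
  · rfl
  rw [pvALoop_eq_rmEsc]
  have hsingle : ∀ xs : List Char, PySem.Chars.isIn ['"'] xs = decide ('"' ∈ xs) := by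
    intro xs
    by_cases hm : '"' ∈ xs
    · simp [hm, (PySem.Chars.isIn_iff_infix _ _).mpr ((List.singleton_infix_iff _ _).mpr hm)]
    · simp only [hm, decide_false]
      rw [PySem.Chars.isIn_eq_false_iff]
      exact fun hin => hm ((List.singleton_infix_iff _ _).mp hin)
  have hb : PySem.Str.isIn "\"" (PySem.Str.replace (PySem.Str.slice value (some 1) (some (-1))) "\\\"" "")
      = decide ('"' ∈ rmEsc (PySem.Str.slice value (some 1) (some (-1))).toList) := by
    rw [PySem.Str.isIn_eq, PySem.Str.toList_replace]
    have : ("\\\"" : String).toList = ['\\', '"'] := by decide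
    rw [this]
    have h0 : ("" : String).toList = [] := by decide
    rw [h0, replace_eq_rmEsc]
    have h1 : ("\"" : String).toList = ['"'] := by decide
    rw [h1, hsingle]
  rw [hb]
  split <;> simp_all

-- ===== VERDICT (by name: the statement is the Claim_ definition above) =====
theorem check_if_const_value___py_spec : Claim_equal_check_if_const_value___py := by
  intro value _ _
  unfold Spec_check_if_const_value___py
  exact ports_eq value
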